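-- pv_equiv track=rewrite | github.com/RohanpatelUpenn/FISHnet | FISHnet/FISHnet_support_functions.py | find_small_groups
-- ===== SOURCE A (Python) =====
-- def find_small_groups(arr, threshold):
--     small_groups = []
--     current_group = []
--     for i in range(len(arr)):
--         if arr[i] == 1:
--             current_group.append(i)
--         else:
--             if len(current_group) > 0:
--                 if len(current_group) <= threshold:
--                     small_groups.append(current_group)
--                 current_group = []
--
--     # Check if the last group is small
--     if len(current_group) > 0 and len(current_group) <= threshold:
--         small_groups.append(current_group)
--
--     return small_groups
-- ===== SOURCE B (Python) =====
-- def find_small_groups(arr, threshold):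
--     # Two-pointer run scanner: find each maximal run of 1s at once and emit its
--     # index range, instead of accumulating indices one by one with a flush step.
--     res = []
--     i = 0
--     n = len(arr)
--     while i < n:
--         if arr[i] != 1:
--             i += 1
--             continue
--         j = i
--         while j < n and arr[j] == 1:
--             j += 1
--         if j - i <= threshold:
--             res.append(list(range(i, j)))
--         i = j
--     return res
-- ===== Notes on version B (the rewrite author's own statement) =====
-- stated objective: alternative
-- what changed: Replaced A's per-index accumulator list with a trailing flush by a two-pointer scanner that locates each maximal run of 1s at once and emits list(range(i, j)) for runs within the threshold.
import Mathlib
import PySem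

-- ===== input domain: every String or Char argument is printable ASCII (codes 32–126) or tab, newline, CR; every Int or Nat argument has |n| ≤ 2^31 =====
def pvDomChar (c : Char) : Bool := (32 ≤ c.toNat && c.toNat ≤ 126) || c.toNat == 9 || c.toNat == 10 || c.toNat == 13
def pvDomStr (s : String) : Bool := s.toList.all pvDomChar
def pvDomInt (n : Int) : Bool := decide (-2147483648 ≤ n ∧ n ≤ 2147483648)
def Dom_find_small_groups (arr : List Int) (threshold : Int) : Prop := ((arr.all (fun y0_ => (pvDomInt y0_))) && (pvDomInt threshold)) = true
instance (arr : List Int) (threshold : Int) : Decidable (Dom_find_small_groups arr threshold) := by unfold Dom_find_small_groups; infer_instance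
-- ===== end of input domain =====

-- B replaces A's index-by-index accumulator (with a trailing flush) by a two-pointer
-- scanner that finds each maximal run of 1s at once and emits its index range (objective: alternative).


-- ===== PORT A =====
-- A's loop over range(len(arr)) as structural recursion with the index counter i
-- and the state (small_groups, current_group); the final flush is the [] case.
def find_small_groups_go (threshold : Int) : List Int → Int → List (List Int) → List Int → List (List Int)
  | [], _, sg, cg =>
      if 0 < cg.length ∧ (cg.length : Int) ≤ threshold then sg ++ [cg] else sg
  | x :: xs, i, sg, cg =>
      if x = 1 then find_small_groups_go threshold xs (i + 1) sg (cg ++ [i])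
      else if 0 < cg.length then
        if (cg.length : Int) ≤ threshold then
          find_small_groups_go threshold xs (i + 1) (sg ++ [cg]) []
        else find_small_groups_go threshold xs (i + 1) sg []
      else find_small_groups_go threshold xs (i + 1) sg cg

def find_small_groups (arr : List Int) (threshold : Int) : List (List Int) :=
  find_small_groups_go threshold arr 0 [] []

-- ===== PORT B =====
-- length of the maximal prefix run of 1s (Source B's inner `while j < n and arr[j] == 1`)
def pvRunOnes : List Int → Nat
  | [] => 0
  | x :: xs => if x = 1 then pvRunOnes xs + 1 else 0

-- list(range(i, i+k))
def pvRangeList (i : Int) (k : Nat) : List Int :=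
  (List.range k).map (fun t => i + (t : Int))

def find_small_groups_alt_go (threshold : Int) : List Int → Int → List (List Int)
  | [], _ => []
  | x :: xs, i =>
      if x ≠ 1 then find_small_groups_alt_go threshold xs (i + 1)
      else
        let k := pvRunOnes (x :: xs)
        (if (k : Int) ≤ threshold then [pvRangeList i k] else []) ++
          find_small_groups_alt_go threshold ((x :: xs).drop k) (i + (k : Int))
  termination_by xs _ => xs.length
  decreasing_by
    all_goals simp_all [pvRunOnes]

def find_small_groups_alt (arr : List Int) (threshold : Int) : List (List Int) :=
  find_small_groups_alt_go threshold arr 0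

-- ===== PRECONDITION & SPEC =====
def Spec_find_small_groups (arr : List Int) (threshold : Int) (out : List (List Int)) : Prop := out = find_small_groups_alt arr threshold
instance (arr : List Int) (threshold : Int) (out : List (List Int)) : Decidable (Spec_find_small_groups arr threshold out) := by unfold Spec_find_small_groups; infer_instance

-- ===== CLAIM (what is proved, stated in full; the proofs are below) =====
def Claim_equal_find_small_groups : Prop := ∀ (arr : List Int) (threshold : Int), Dom_find_small_groups arr threshold → Spec_find_small_groups arr threshold (find_small_groups arr threshold)

-- ===== LEMMAS AND PROOFS =====

theorem pvRangeList_snoc (s : Int) (m : Nat) :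
    pvRangeList s m ++ [s + (m : Int)] = pvRangeList s (m + 1) := by
  simp [pvRangeList, List.range_succ]

theorem pvRangeList_length (s : Int) (m : Nat) : (pvRangeList s m).length = m := by
  simp [pvRangeList]

-- Main invariant, both statements proved by one induction on xs:
-- (left)  with empty current group, A's loop equals B's scanner;
-- (right) inside a run (current group = [s, …, s+m-1], m ≥ 1), A's loop finishes
--         the run and equals B's "emit the whole run" step.
theorem go_pair (threshold : Int) (xs : List Int) :
    (∀ i sg, find_small_groups_go threshold xs i sg [] =
        sg ++ find_small_groups_alt_go threshold xs i) ∧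
    (∀ (s : Int) (m : Nat) sg, 1 ≤ m →
        find_small_groups_go threshold xs (s + (m : Int)) sg (pvRangeList s m) =
          sg ++ ((if ((m + pvRunOnes xs : Nat) : Int) ≤ threshold then
                    [pvRangeList s (m + pvRunOnes xs)] else []) ++
                 find_small_groups_alt_go threshold (xs.drop (pvRunOnes xs))
                   (s + ((m + pvRunOnes xs : Nat) : Int)))) := by
  induction xs with
  | nil =>
      constructor
      · intro i sg
        simp [find_small_groups_go, find_small_groups_alt_go]
      · intro s m sg hm
        simp only [find_small_groups_go, find_small_groups_alt_go, pvRunOnes,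
          pvRangeList_length, Nat.add_zero, List.drop_nil, List.append_nil]
        split_ifs with h1 h2 <;> simp_all
  | cons x xs ih =>
      constructor
      · intro i sg
        by_cases hx : x = 1
        · subst hx
          have h1 : find_small_groups_go threshold (1 :: xs) i sg [] =
              find_small_groups_go threshold xs (i + 1) sg (pvRangeList i 1) := by
            simp [find_small_groups_go, pvRangeList]
          have h3 := ih.2 i 1 sg (le_refl 1)
          rw [show i + ((1 : Nat) : Int) = i + 1 from by norm_num] at h3
          rw [h1, h3]
          have hrun : pvRunOnes (1 :: xs) = pvRunOnes xs + 1 := by simp [pvRunOnes]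
          have hB : find_small_groups_alt_go threshold (1 :: xs) i =
              (if ((pvRunOnes xs + 1 : Nat) : Int) ≤ threshold then
                  [pvRangeList i (pvRunOnes xs + 1)] else []) ++
                find_small_groups_alt_go threshold (xs.drop (pvRunOnes xs))
                  (i + ((pvRunOnes xs + 1 : Nat) : Int)) := by
            simp only [find_small_groups_alt_go, hrun]
            simp [List.drop_succ_cons]
          rw [hB, Nat.add_comm 1 (pvRunOnes xs)]
        · simp [find_small_groups_go, find_small_groups_alt_go, hx, ih.1]
      · intro s m sg hm
        by_cases hx : x = 1
        · subst hx
          have h1 : find_small_groups_go threshold (1 :: xs) (s + (m : Int)) sg (pvRangeList s m) =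
              find_small_groups_go threshold xs (s + (m : Int) + 1) sg
                (pvRangeList s m ++ [s + (m : Int)]) := by
            simp [find_small_groups_go]
          rw [h1, pvRangeList_snoc]
          have h3 := ih.2 s (m + 1) sg (by omega)
          rw [show s + ((m + 1 : Nat) : Int) = s + (m : Int) + 1 from by push_cast; ring] at h3
          rw [h3]
          have hrun : pvRunOnes (1 :: xs) = pvRunOnes xs + 1 := by simp [pvRunOnes]
          rw [hrun, show m + (pvRunOnes xs + 1) = m + 1 + pvRunOnes xs from by omega,
            List.drop_succ_cons]
        · -- run ends here: A flushes the group, B already emitted it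
          have hrun : pvRunOnes (x :: xs) = 0 := by simp [pvRunOnes, hx]
          rw [hrun]
          simp only [Nat.add_zero, List.drop_zero]
          have hlen : 0 < (pvRangeList s m).length := by
            rw [pvRangeList_length]; omega
          have hlen' : ((pvRangeList s m).length : Int) = (m : Int) := by
            rw [pvRangeList_length]
          have hB : find_small_groups_alt_go threshold (x :: xs) (s + (m : Int)) =
              find_small_groups_alt_go threshold xs (s + (m : Int) + 1) := by
            simp [find_small_groups_alt_go, hx]
          rw [hB]
          by_cases ht : ((m : Nat) : Int) ≤ threshold
          · have h1 : find_small_groups_go threshold (x :: xs) (s + (m : Int)) sg (pvRangeList s m) =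
                find_small_groups_go threshold xs (s + (m : Int) + 1) (sg ++ [pvRangeList s m]) [] := by
              simp [find_small_groups_go, hx, hlen, hlen', ht]
            rw [h1, ih.1]
            simp [ht]
          · have h1 : find_small_groups_go threshold (x :: xs) (s + (m : Int)) sg (pvRangeList s m) =
                find_small_groups_go threshold xs (s + (m : Int) + 1) sg [] := by
              simp [find_small_groups_go, hx, hlen, hlen', ht]
            rw [h1, ih.1]
            simp [ht]

-- ===== VERDICT (by name: the statement is the Claim_ definition above) =====
theorem find_small_groups_spec : Claim_equal_find_small_groups := by
  intro arr threshold _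
  unfold Spec_find_small_groups find_small_groups find_small_groups_alt
  simpa using (go_pair threshold arr).1 0 []
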